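-- pv_equiv track=rewrite | github.com/Armantyandra77/polymarket-weather-bot | polymarket_weather_bot/bootstrap_auth.py | _render_env_file
-- ===== SOURCE A (Python) =====
-- import shlex
-- from typing import Any, Dict, Iterable, List, Mapping
--
-- def _format_env_value(value: str) -> str:
--     return shlex.quote(value)
--
-- def _render_env_file(existing_lines: List[str], updates: Mapping[str, str]) -> List[str]:
--     last_update_idx: Dict[str, int] = {}
--     for idx, raw_line in enumerate(existing_lines):
--         line = raw_line.strip()
--         if not line or line.startswith('#') or '=' not in line:
--             continue
--         key = line.split('=', 1)[0].strip()
--         if key in updates: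
--             last_update_idx[key] = idx
--
--     seen: set[str] = set()
--     output: List[str] = []
--     for idx, raw_line in enumerate(existing_lines):
--         line = raw_line.strip()
--         if not line or line.startswith('#') or '=' not in line:
--             output.append(raw_line)
--             continue
--         key = line.split('=', 1)[0].strip()
--         if key in updates:
--             if last_update_idx.get(key) != idx:
--                 continue
--             output.append(f'{key}={_format_env_value(str(updates[key]))}')
--             seen.add(key)
--         else:
--             output.append(raw_line)
--
--     missing = [key for key in updates if key not in seen]
--     if missing:
--         if output and output[-1].strip():
--             output.append('')
--         output.append('# Derived / refreshed by bootstrap_polymarket_auth.py')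
--         for key in missing:
--             output.append(f'{key}={_format_env_value(str(updates[key]))}')
--     return output
-- ===== SOURCE B (Python) =====
-- import re
--
-- # POSIX shell quoting (the standard shlex.quote): quote unless every
-- # character is shell-safe.
-- _UNSAFE = re.compile(r'[^\w@%+=:,./-]', re.ASCII)
--
-- def _quote(value):
--     if not value:
--         return "''"
--     if _UNSAFE.search(value) is None:
--         return value
--     return "'" + value.replace("'", "'\"'\"'") + "'"
--
-- def _render_env_file(existing_lines, updates):
--     # Single reverse pass: for each key being updated, only its last
--     # occurrence survives (rewritten in place); everything else passes through.
--     seen = set()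
--     rev_out = []
--     for raw_line in reversed(existing_lines):
--         line = raw_line.strip()
--         if not line or line.startswith('#') or '=' not in line:
--             rev_out.append(raw_line)
--             continue
--         key = line.split('=', 1)[0].strip()
--         if key not in updates:
--             rev_out.append(raw_line)
--         elif key not in seen:
--             rev_out.append(f'{key}={_quote(str(updates[key]))}')
--             seen.add(key)
--     output = rev_out[::-1]
--     missing = [key for key in updates if key not in seen]
--     if missing:
--         if output and output[-1].strip():
--             output.append('')
--         output.append('# Derived / refreshed by bootstrap_polymarket_auth.py')
--         for key in missing:
--             output.append(f'{key}={_quote(str(updates[key]))}')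
--     return output
-- ===== Notes on version B (the rewrite author's own statement) =====
-- stated objective: simpler
-- what changed: Drops A's first pass that builds a last-occurrence index dict: B makes a single reverse pass with a seen-set, keeping the first occurrence met in reverse (= the last occurrence) and reversing the accumulator back.
import Mathlib
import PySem

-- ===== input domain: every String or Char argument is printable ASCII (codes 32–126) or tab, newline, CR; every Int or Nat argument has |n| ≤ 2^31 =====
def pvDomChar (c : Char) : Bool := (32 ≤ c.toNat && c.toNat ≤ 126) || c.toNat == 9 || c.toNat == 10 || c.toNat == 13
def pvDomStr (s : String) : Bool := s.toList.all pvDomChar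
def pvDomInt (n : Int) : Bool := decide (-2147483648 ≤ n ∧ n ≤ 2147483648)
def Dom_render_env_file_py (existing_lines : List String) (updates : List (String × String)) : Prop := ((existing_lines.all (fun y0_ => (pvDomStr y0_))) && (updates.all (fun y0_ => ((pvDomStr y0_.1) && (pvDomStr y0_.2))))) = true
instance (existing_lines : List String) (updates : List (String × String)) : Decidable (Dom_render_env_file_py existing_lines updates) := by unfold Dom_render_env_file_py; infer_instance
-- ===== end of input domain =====

-- B replaces A's two forward passes (last-occurrence index dict + rescan) by one reverse pass with a seen-set; objective: simpler.

-- ===== PORT A =====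
-- shared helper: shlex.quote (exact on the ASCII domain; safe chars are re.ASCII [\w@%+=:,./-])
def pvQuote (s : String) : String :=
  if s = "" then "''"
  else if s.toList.all (fun c => PySem.Chars.isalnum c || "_@%+=:,./-".toList.contains c) then s
  else "'" ++ PySem.Str.replace s "'" "'\"'\"'" ++ "'"

-- shared helper: line.split('=', 1)[0].strip()
def pvKeyOf (line : String) : String :=
  PySem.Str.strip (((PySem.Str.splitMax? line "=" 1).getD []).headD "")

-- shared helper: not line or line.startswith('#') or '=' not in line
def pvSkip (line : String) : Bool :=
  line == "" || PySem.Str.startswith line "#" || !(PySem.Str.isIn "=" line)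

-- A, first loop body: record the index of the last line whose key is an update key
def pvStepLast (updates : PySem.Dict String String) (d : PySem.Dict String Int)
    (p : Int × String) : PySem.Dict String Int :=
  let line := PySem.Str.strip p.2
  if pvSkip line then d
  else
    let key := pvKeyOf line
    if updates.contains key then d.insert key p.1 else d

-- A, second loop body: emit, dropping update-key lines that are not the last occurrence
def pvStepOut (updates : PySem.Dict String String) (last : PySem.Dict String Int)
    (st : List String × PySem.Set String) (p : Int × String) : List String × PySem.Set String :=
  let line := PySem.Str.strip p.2
  if pvSkip line then (st.1 ++ [p.2], st.2)
  else
    let key := pvKeyOf line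
    if updates.contains key then
      if last.get? key ≠ some p.1 then st
      else (st.1 ++ [key ++ "=" ++ pvQuote (updates.getD key "")], PySem.Set.add st.2 key)
    else (st.1 ++ [p.2], st.2)

-- shared helper: the trailing 'missing' block (identical code in A and B)
def pvTail (updates : PySem.Dict String String) (output : List String) (seen : PySem.Set String) :
    List String :=
  let missing := updates.keys.filter (fun k => !(PySem.Set.contains seen k))
  if missing = [] then output
  else
    (if output ≠ [] ∧ PySem.Str.strip (output.getLastD "") ≠ "" then output ++ [""] else output)
      ++ ["# Derived / refreshed by bootstrap_polymarket_auth.py"]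
      ++ missing.map (fun k => k ++ "=" ++ pvQuote (updates.getD k ""))

def render_env_file_py (existing_lines : List String) (updates : List (String × String)) :
    List String :=
  let u := PySem.Dict.ofList updates
  let last := (PySem.List.enumerate existing_lines).foldl (pvStepLast u) PySem.Dict.empty
  let st := (PySem.List.enumerate existing_lines).foldl (pvStepOut u last) ([], PySem.Set.empty)
  pvTail u st.1 st.2

-- ===== PORT B =====
-- B, reverse loop body: keep the first occurrence met in reverse order (= last occurrence)
def pvStepRev (updates : PySem.Dict String String)
    (st : List String × PySem.Set String) (raw : String) : List String × PySem.Set String :=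
  let line := PySem.Str.strip raw
  if pvSkip line then (st.1 ++ [raw], st.2)
  else
    let key := pvKeyOf line
    if !(updates.contains key) then (st.1 ++ [raw], st.2)
    else if PySem.Set.contains st.2 key then st
    else (st.1 ++ [key ++ "=" ++ pvQuote (updates.getD key "")], PySem.Set.add st.2 key)

def render_env_file_py_alt (existing_lines : List String) (updates : List (String × String)) :
    List String :=
  let u := PySem.Dict.ofList updates
  let st := existing_lines.reverse.foldl (pvStepRev u) ([], PySem.Set.empty)
  pvTail u st.1.reverse st.2

-- ===== PRECONDITION & SPEC =====
def Spec_render_env_file_py (existing_lines : List String) (updates : List (String × String)) (out : List String) : Prop := out = render_env_file_py_alt existing_lines updates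
instance (existing_lines : List String) (updates : List (String × String)) (out : List String) : Decidable (Spec_render_env_file_py existing_lines updates out) := by unfold Spec_render_env_file_py; infer_instance

-- ===== CLAIM (what is proved, stated in full; the proofs are below) =====
def Claim_equal_render_env_file_py : Prop := ∀ (existing_lines : List String) (updates : List (String × String)), Dom_render_env_file_py existing_lines updates → Spec_render_env_file_py existing_lines updates (render_env_file_py existing_lines updates)

-- ===== LEMMAS AND PROOFS =====

-- proof-side vocabulary
def pvKeyR (raw : String) : String := pvKeyOf (PySem.Str.strip raw)

def pvManaged (u : PySem.Dict String String) (raw : String) : Bool :=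
  !(pvSkip (PySem.Str.strip raw)) && u.contains (pvKeyR raw)

def pvHasOcc (u : PySem.Dict String String) (l : List String) (k : String) : Bool :=
  l.any (fun y => pvManaged u y && (pvKeyR y == k))

def pvEmit (u : PySem.Dict String String) (raw : String) : String :=
  pvKeyR raw ++ "=" ++ pvQuote (u.getD (pvKeyR raw) "")

-- reference output: emit a managed line iff no later managed line shares its key
def pvRef (u : PySem.Dict String String) : List String → List String
  | [] => []
  | x :: rest =>
    if pvManaged u x then
      if pvHasOcc u rest (pvKeyR x) then pvRef u rest else pvEmit u x :: pvRef u rest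
    else x :: pvRef u rest

-- the first pass of A, restricted to one key
def pvLastO (u : PySem.Dict String String) (k : String) (r : Option Int) (p : Int × String) :
    Option Int :=
  if pvManaged u p.2 && (pvKeyR p.2 == k) then some p.1 else r

theorem pv_contains_add (s : PySem.Set String) (x y : String) :
    PySem.Set.contains (PySem.Set.add s x) y = (PySem.Set.contains s y || x == y) := by
  rcases eq_or_ne x y with rfl | hxy
  · by_cases h : x ∈ s <;> simp [PySem.Set.add, PySem.Set.contains, h]
  · by_cases h : x ∈ s <;>
      simp [PySem.Set.add, PySem.Set.contains, h, hxy, Ne.symm hxy, beq_iff_eq]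

theorem pvStepLast_get? (u : PySem.Dict String String) (d : PySem.Dict String Int)
    (p : Int × String) (k : String) :
    (pvStepLast u d p).get? k = pvLastO u k (d.get? k) p := by
  unfold pvStepLast pvLastO pvManaged pvKeyR
  by_cases hs : pvSkip (PySem.Str.strip p.2)
  · simp [hs]
  by_cases hc : u.contains (pvKeyOf (PySem.Str.strip p.2))
  · rcases eq_or_ne (pvKeyOf (PySem.Str.strip p.2)) k with he | he
    · rw [he] at hc
      simp [hs, hc, he, PySem.Dict.get?_insert_self]
    · simp [hs, hc, he, PySem.Dict.get?_insert_of_ne d _ (Ne.symm he)]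
  · simp [hs, hc]

theorem pvL1 (u : PySem.Dict String String) (k : String) :
    ∀ (l : List (Int × String)) (d : PySem.Dict String Int),
      (l.foldl (pvStepLast u) d).get? k = l.foldl (pvLastO u k) (d.get? k) := by
  intro l
  induction l with
  | nil => intro d; rfl
  | cons p t ih =>
    intro d
    simp only [List.foldl_cons, ih, pvStepLast_get?]

theorem pvL4 (u : PySem.Dict String String) (k : String) :
    ∀ (xs : List String) (s : Int) (r : Option Int), pvHasOcc u xs k = false →
      (PySem.List.enumerate xs s).foldl (pvLastO u k) r = r := by
  intro xs
  induction xs with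
  | nil => intro s r _; rfl
  | cons x rest ih =>
    intro s r h
    simp only [pvHasOcc, List.any_cons, Bool.or_eq_false_iff] at h
    rw [PySem.List.enumerate_cons, List.foldl_cons]
    have hstep : pvLastO u k r (s, x) = r := by simp [pvLastO, h.1]
    rw [hstep, ih (s + 1) r h.2]

theorem pvL5 (u : PySem.Dict String String) (k : String) :
    ∀ (xs : List String) (s : Int) (r : Option Int), pvHasOcc u xs k = true →
      ∃ j : Int, s ≤ j ∧ (PySem.List.enumerate xs s).foldl (pvLastO u k) r = some j := by
  intro xs
  induction xs with
  | nil => intro s r h; simp [pvHasOcc] at h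
  | cons x rest ih =>
    intro s r h
    rw [PySem.List.enumerate_cons, List.foldl_cons]
    by_cases hh : (pvManaged u x && (pvKeyR x == k)) = true
    · have hstep : pvLastO u k r (s, x) = some s := by simp [pvLastO, hh]
      rw [hstep]
      by_cases hr : pvHasOcc u rest k = true
      · obtain ⟨j, hj, he⟩ := ih (s + 1) (some s) hr
        exact ⟨j, by omega, he⟩
      · exact ⟨s, le_refl s, pvL4 u k rest (s + 1) (some s) (by simpa using hr)⟩
    · have hh' : (pvManaged u x && (pvKeyR x == k)) = false := by simpa using hh
      have hstep : pvLastO u k r (s, x) = r := by simp [pvLastO, hh']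
      have hr : pvHasOcc u rest k = true := by
        simp only [pvHasOcc, List.any_cons] at h
        rcases Bool.or_eq_true_iff.mp h with h1 | h1
        · exact absurd h1 hh
        · exact h1
      obtain ⟨j, hj, he⟩ := ih (s + 1) r hr
      rw [hstep]
      exact ⟨j, by omega, he⟩

theorem pvHasOcc_cons_not_managed (u : PySem.Dict String String) (x : String)
    (rest : List String) (k : String) (hm : pvManaged u x = false) :
    pvHasOcc u (x :: rest) k = pvHasOcc u rest k := by
  simp [pvHasOcc, hm]

theorem pvHasOcc_cons_of_occ (u : PySem.Dict String String) (x : String)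
    (rest : List String) (hm : pvManaged u x = true)
    (hr : pvHasOcc u rest (pvKeyR x) = true) (k : String) :
    pvHasOcc u (x :: rest) k = pvHasOcc u rest k := by
  simp only [pvHasOcc, List.any_cons]
  by_cases hk : (pvKeyR x == k) = true
  · have hk' : pvKeyR x = k := by simpa using hk
    subst hk'
    rw [show (pvManaged u x && (pvKeyR x == pvKeyR x)) = true by simp [hm], Bool.true_or]
    exact ((by simpa [pvHasOcc] using hr) : rest.any _ = true).symm
  · simp [hk]

theorem pvHasOcc_cons_managed (u : PySem.Dict String String) (x : String)
    (rest : List String) (k : String) (hm : pvManaged u x = true) :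
    pvHasOcc u (x :: rest) k = ((pvKeyR x == k) || pvHasOcc u rest k) := by
  simp [pvHasOcc, hm]

theorem pvStepOut_not_managed (u : PySem.Dict String String) (last : PySem.Dict String Int)
    (st : List String × PySem.Set String) (n : Int) (x : String)
    (hm : pvManaged u x = false) : pvStepOut u last st (n, x) = (st.1 ++ [x], st.2) := by
  unfold pvStepOut
  rcases Bool.and_eq_false_iff.mp hm with h | h
  · have hs : pvSkip (PySem.Str.strip x) = true := by simpa using h
    simp [hs]
  · by_cases hs : pvSkip (PySem.Str.strip x) = true <;> simp [hs, pvKeyR] at h ⊢ <;> simp [h]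

theorem pvStepOut_managed (u : PySem.Dict String String) (last : PySem.Dict String Int)
    (st : List String × PySem.Set String) (n : Int) (x : String)
    (hm : pvManaged u x = true) :
    pvStepOut u last st (n, x) =
      if last.get? (pvKeyR x) ≠ some n then st
      else (st.1 ++ [pvEmit u x], PySem.Set.add st.2 (pvKeyR x)) := by
  unfold pvStepOut pvEmit
  obtain ⟨h1, h2⟩ := Bool.and_eq_true_iff.mp hm
  have hs : pvSkip (PySem.Str.strip x) = false := by simpa using h1
  simp only [pvKeyR] at h2 ⊢
  simp [hs, h2]

theorem pvLemA (u : PySem.Dict String String) (last : PySem.Dict String Int) :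
    ∀ (xs : List String) (n : Int) (f : String → Option Int),
      (∀ k j, f k = some j → j < n) →
      (∀ k, last.get? k = (PySem.List.enumerate xs n).foldl (pvLastO u k) (f k)) →
      ∀ (acc : List String) (seen : PySem.Set String),
        ((PySem.List.enumerate xs n).foldl (pvStepOut u last) (acc, seen)).1 = acc ++ pvRef u xs
        ∧ ∀ k, PySem.Set.contains ((PySem.List.enumerate xs n).foldl (pvStepOut u last) (acc, seen)).2 k
              = (PySem.Set.contains seen k || pvHasOcc u xs k) := by
  intro xs
  induction xs with
  | nil =>
    intro n f hf hD acc seen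
    constructor
    · simp [pvRef]
    · intro k; simp [pvHasOcc]
  | cons x rest ih =>
    intro n f hf hD acc seen
    rw [PySem.List.enumerate_cons, List.foldl_cons]
    by_cases hm : pvManaged u x = true
    · -- managed line; let k0 be its key
      have hDk0 := hD (pvKeyR x)
      rw [PySem.List.enumerate_cons, List.foldl_cons] at hDk0
      have hhead : pvLastO u (pvKeyR x) (f (pvKeyR x)) (n, x) = some n := by
        simp [pvLastO, hm]
      rw [hhead] at hDk0
      -- the shifted prefix function for the tail
      have hf' : ∀ k j, (if pvKeyR x == k then some n else f k) = some j → j < n + 1 := by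
        intro k j hkj
        by_cases hk : pvKeyR x == k
        · simp [hk] at hkj; omega
        · simp [hk] at hkj; have := hf k j hkj; omega
      have hD' : ∀ k, last.get? k =
          (PySem.List.enumerate rest (n + 1)).foldl (pvLastO u k)
            (if pvKeyR x == k then some n else f k) := by
        intro k
        have := hD k
        rw [PySem.List.enumerate_cons, List.foldl_cons] at this
        have hh : pvLastO u k (f k) (n, x) = if pvKeyR x == k then some n else f k := by
          simp [pvLastO, hm]
        rw [hh] at this
        exact this
      by_cases hr : pvHasOcc u rest (pvKeyR x) = true
      · -- a later occurrence exists: A drops this line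
        obtain ⟨j, hj, he⟩ := pvL5 u (pvKeyR x) rest (n + 1) (some n) hr
        have htest : last.get? (pvKeyR x) ≠ some n := by
          rw [hDk0, he]; intro hcon
          have : j = n := by simpa using hcon
          omega
        rw [pvStepOut_managed u last (acc, seen) n x hm, if_pos htest]
        obtain ⟨ih1, ih2⟩ := ih (n + 1) _ hf' hD' acc seen
        constructor
        · rw [ih1]
          have : pvRef u (x :: rest) = pvRef u rest := by simp [pvRef, hm, hr]
          rw [this]
        · intro k
          rw [ih2 k]
          rw [pvHasOcc_cons_of_occ u x rest hm hr k]
      · -- last occurrence: A emits the rendered line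
        have hlast : last.get? (pvKeyR x) = some n := by
          rw [hDk0, pvL4 u (pvKeyR x) rest (n + 1) (some n) (by simpa using hr)]
        rw [pvStepOut_managed u last (acc, seen) n x hm, if_neg (by simp [hlast])]
        obtain ⟨ih1, ih2⟩ := ih (n + 1) _ hf' hD' (acc ++ [pvEmit u x]) (PySem.Set.add seen (pvKeyR x))
        constructor
        · rw [ih1]
          have : pvRef u (x :: rest) = pvEmit u x :: pvRef u rest := by simp [pvRef, hm, hr]
          rw [this, List.append_assoc]
          rfl
        · intro k
          rw [ih2 k, pv_contains_add, pvHasOcc_cons_managed u x rest k hm]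
          cases PySem.Set.contains seen k <;> cases (pvKeyR x == k) <;> simp
    · -- pass-through line
      have hm' : pvManaged u x = false := by simpa using hm
      rw [pvStepOut_not_managed u last (acc, seen) n x hm']
      have hf' : ∀ k j, f k = some j → j < n + 1 := by
        intro k j hkj; have := hf k j hkj; omega
      have hD' : ∀ k, last.get? k =
          (PySem.List.enumerate rest (n + 1)).foldl (pvLastO u k) (f k) := by
        intro k
        have := hD k
        rw [PySem.List.enumerate_cons, List.foldl_cons] at this
        have hh : pvLastO u k (f k) (n, x) = f k := by simp [pvLastO, hm']
        rw [hh] at this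
        exact this
      obtain ⟨ih1, ih2⟩ := ih (n + 1) f hf' hD' (acc ++ [x]) seen
      constructor
      · rw [ih1]
        have : pvRef u (x :: rest) = x :: pvRef u rest := by simp [pvRef, hm']
        rw [this, List.append_assoc]
        rfl
      · intro k
        rw [ih2 k, pvHasOcc_cons_not_managed u x rest k hm']

theorem pvStepRev_not_managed (u : PySem.Dict String String)
    (st : List String × PySem.Set String) (x : String)
    (hm : pvManaged u x = false) : pvStepRev u st x = (st.1 ++ [x], st.2) := by
  unfold pvStepRev
  rcases Bool.and_eq_false_iff.mp hm with h | h
  · have hs : pvSkip (PySem.Str.strip x) = true := by simpa using h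
    simp [hs]
  · by_cases hs : pvSkip (PySem.Str.strip x) = true <;> simp [hs, pvKeyR] at h ⊢ <;> simp [h]

theorem pvStepRev_managed (u : PySem.Dict String String)
    (st : List String × PySem.Set String) (x : String)
    (hm : pvManaged u x = true) :
    pvStepRev u st x =
      if PySem.Set.contains st.2 (pvKeyR x) = true then st
      else (st.1 ++ [pvEmit u x], PySem.Set.add st.2 (pvKeyR x)) := by
  unfold pvStepRev pvEmit
  obtain ⟨h1, h2⟩ := Bool.and_eq_true_iff.mp hm
  have hs : pvSkip (PySem.Str.strip x) = false := by simpa using h1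
  simp only [pvKeyR] at h2 ⊢
  simp [hs, h2]

theorem pvLemB (u : PySem.Dict String String) :
    ∀ (xs : List String),
      (xs.reverse.foldl (pvStepRev u) ([], PySem.Set.empty)).1.reverse = pvRef u xs
      ∧ ∀ k, PySem.Set.contains (xs.reverse.foldl (pvStepRev u) ([], PySem.Set.empty)).2 k
            = pvHasOcc u xs k := by
  intro xs
  induction xs with
  | nil =>
    constructor
    · simp [pvRef]
    · intro k; simp [pvHasOcc, PySem.Set.contains, PySem.Set.empty]
  | cons x rest ih =>
    obtain ⟨ih1, ih2⟩ := ih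
    have hsplit : (x :: rest).reverse.foldl (pvStepRev u) ([], PySem.Set.empty)
        = pvStepRev u (rest.reverse.foldl (pvStepRev u) ([], PySem.Set.empty)) x := by
      rw [List.reverse_cons, List.foldl_append, List.foldl_cons, List.foldl_nil]
    rw [hsplit]
    by_cases hm : pvManaged u x = true
    · rw [pvStepRev_managed u _ x hm]
      by_cases hr : pvHasOcc u rest (pvKeyR x) = true
      · rw [if_pos (by rw [ih2]; exact hr)]
        constructor
        · rw [ih1]
          simp [pvRef, hm, hr]
        · intro k
          rw [ih2 k, (pvHasOcc_cons_of_occ u x rest hm hr k)]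
      · rw [if_neg (by rw [ih2]; simpa using hr)]
        constructor
        · rw [List.reverse_append, List.reverse_singleton, List.singleton_append, ih1]
          simp [pvRef, hm, hr]
        · intro k
          rw [pv_contains_add, ih2 k, pvHasOcc_cons_managed u x rest k hm]
          cases (pvKeyR x == k) <;> cases pvHasOcc u rest k <;> simp
    · have hm' : pvManaged u x = false := by simpa using hm
      rw [pvStepRev_not_managed u _ x hm']
      constructor
      · simp only [List.reverse_append, List.reverse_singleton, List.singleton_append]
        rw [ih1]
        simp [pvRef, hm']
      · intro k
        rw [ih2 k, pvHasOcc_cons_not_managed u x rest k hm']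

theorem pvTail_congr (u : PySem.Dict String String) (out : List String)
    (s1 s2 : PySem.Set String)
    (h : ∀ k, PySem.Set.contains s1 k = PySem.Set.contains s2 k) :
    pvTail u out s1 = pvTail u out s2 := by
  unfold pvTail
  have : (u.keys.filter (fun k => !(PySem.Set.contains s1 k)))
       = (u.keys.filter (fun k => !(PySem.Set.contains s2 k))) :=
    List.filter_congr (fun k _ => by rw [h k])
  rw [this]

-- ===== VERDICT (by name: the statement is the Claim_ definition above) =====
theorem render_env_file_py_spec : Claim_equal_render_env_file_py := by
  intro xs updates _
  unfold Spec_render_env_file_py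
  show pvTail (PySem.Dict.ofList updates)
      ((PySem.List.enumerate xs).foldl
        (pvStepOut (PySem.Dict.ofList updates)
          ((PySem.List.enumerate xs).foldl (pvStepLast (PySem.Dict.ofList updates))
            PySem.Dict.empty))
        ([], PySem.Set.empty)).1
      ((PySem.List.enumerate xs).foldl
        (pvStepOut (PySem.Dict.ofList updates)
          ((PySem.List.enumerate xs).foldl (pvStepLast (PySem.Dict.ofList updates))
            PySem.Dict.empty))
        ([], PySem.Set.empty)).2
    = pvTail (PySem.Dict.ofList updates)
        (xs.reverse.foldl (pvStepRev (PySem.Dict.ofList updates)) ([], PySem.Set.empty)).1.reverse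
        (xs.reverse.foldl (pvStepRev (PySem.Dict.ofList updates)) ([], PySem.Set.empty)).2
  have hD : ∀ k, ((PySem.List.enumerate xs).foldl (pvStepLast (PySem.Dict.ofList updates))
      PySem.Dict.empty).get? k
      = (PySem.List.enumerate xs).foldl (pvLastO (PySem.Dict.ofList updates) k) none := by
    intro k
    rw [pvL1, PySem.Dict.get?_empty]
  obtain ⟨hA1, hA2⟩ := pvLemA (PySem.Dict.ofList updates) _ xs 0 (fun _ => none)
    (by intro k j h; exact absurd h (by simp)) hD [] PySem.Set.empty
  obtain ⟨hB1, hB2⟩ := pvLemB (PySem.Dict.ofList updates) xs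
  rw [hA1, hB1]
  exact pvTail_congr _ _ _ _ (fun k => by
    rw [hA2 k, hB2 k]
    simp [PySem.Set.contains, PySem.Set.empty])
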